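-- pv_equiv track=rewrite | github.com/pablohonney/rosalind | finding_a_spliced_motif/solution.py | _get_motif_occurrences
-- ===== SOURCE A (Python) =====
-- def _get_motif_occurrences(text: str, motif: str) -> dict:
--     motif_occurrences = {}
--     for motif_char in motif:
--         motif_occurrences[motif_char] = []
--
--     for text_i, text_char in enumerate(text):
--         if text_char in motif_occurrences:
--             motif_occurrences[text_char].append(text_i)
--
--     return motif_occurrences
-- ===== SOURCE B (Python) =====
-- def _get_motif_occurrences(text: str, motif: str) -> dict:
--     return {c: [i for i, ch in enumerate(text) if ch == c] for c in motif}
-- ===== Notes on version B (the rewrite author's own statement) =====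
-- stated objective: idiomatic
-- what changed: Replaces the two sequential loops (pre-seed keys, then one linear scan appending into the dict) with a single dict comprehension that, for each motif character, scans the text once collecting its positions.
import Mathlib
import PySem

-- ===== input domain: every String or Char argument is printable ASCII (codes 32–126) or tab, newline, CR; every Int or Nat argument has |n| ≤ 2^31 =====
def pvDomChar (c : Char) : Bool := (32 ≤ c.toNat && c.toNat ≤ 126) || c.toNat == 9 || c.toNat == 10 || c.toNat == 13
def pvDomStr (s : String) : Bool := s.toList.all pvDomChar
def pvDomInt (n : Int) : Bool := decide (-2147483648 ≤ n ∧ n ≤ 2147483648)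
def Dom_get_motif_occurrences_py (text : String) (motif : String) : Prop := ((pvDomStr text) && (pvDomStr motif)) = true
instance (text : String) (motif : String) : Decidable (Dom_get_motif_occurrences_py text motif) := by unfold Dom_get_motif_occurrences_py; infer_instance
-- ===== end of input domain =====

-- B replaces A's two sequential loops by a single dict comprehension with a per-motif-char
-- scan of the text (more idiomatic, not faster); same return value for every input.

-- ===== PORT A =====
-- A: seed the dict with every motif char ↦ [], then one pass over enumerate(text)
-- appending each index to its char's list when the char is a key.
def get_motif_occurrences_py (text : String) (motif : String) : List (String × List Int) :=
  let d0 : PySem.Dict String (List Int) :=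
    motif.toList.foldl (fun d c => d.insert (String.mk [c]) []) PySem.Dict.empty
  ((PySem.List.enumerate text.toList).foldl
    (fun d p =>
      if d.contains (String.mk [p.2]) then
        d.modify (String.mk [p.2]) [] (fun v => v ++ [p.1])
      else d)
    d0).items

-- ===== PORT B =====
-- B: {c: [i for i, ch in enumerate(text) if ch == c] for c in motif}
def get_motif_occurrences_py_alt (text : String) (motif : String) : List (String × List Int) :=
  (motif.toList.foldl
    (fun d c => d.insert (String.mk [c])
      ((PySem.List.enumerate text.toList).foldl
        (fun acc p => if p.2 == c then acc ++ [p.1] else acc) []))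
    (PySem.Dict.empty : PySem.Dict String (List Int))).items

-- ===== PRECONDITION & SPEC =====
def Spec_get_motif_occurrences_py (text : String) (motif : String) (out : List (String × List Int)) : Prop := out = get_motif_occurrences_py_alt text motif
instance (text : String) (motif : String) (out : List (String × List Int)) : Decidable (Spec_get_motif_occurrences_py text motif out) := by unfold Spec_get_motif_occurrences_py; infer_instance

-- ===== CLAIM (what is proved, stated in full; the proofs are below) =====
def Claim_equal_get_motif_occurrences_py : Prop := ∀ (text : String) (motif : String), Dom_get_motif_occurrences_py text motif → Spec_get_motif_occurrences_py text motif (get_motif_occurrences_py text motif)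

-- ===== LEMMAS AND PROOFS =====

-- positions (from the enumerated list l) of the char whose singleton-string key is k
def pvOcc (l : List (Int × Char)) (k : String) : List Int :=
  (l.filter (fun p => String.mk [p.2] == k)).map Prod.fst

theorem pvKey_inj (a b : Char) : (String.mk [a] = String.mk [b]) ↔ a = b :=
  ⟨fun h => by simpa using String.ofList_injective h, fun h => by rw [h]⟩

theorem pvItems_mk {κ ν : Type} (l : List (κ × ν)) : (⟨l⟩ : PySem.Dict κ ν).items = l := rfl

theorem pvDictExt {κ ν : Type} (a b : PySem.Dict κ ν) (h : a.items = b.items) : a = b := by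
  cases a; cases b; cases h; rfl

-- B's inner comprehension fold computes pvOcc
theorem pvInner_eq_occ (l : List (Int × Char)) (c : Char) :
    l.foldl (fun acc p => if p.2 == c then acc ++ [p.1] else acc) []
      = pvOcc l (String.mk [c]) := by
  rw [PySem.List.foldl_append_if (fun p => p.2 == c) Prod.fst l []]
  unfold pvOcc
  simp only [List.nil_append]
  congr 1
  apply List.filter_congr
  intro p _
  by_cases h : p.2 = c
  · simp [h]
  · simp [h, (pvKey_inj p.2 c).not.mpr h]

theorem pvOcc_nil (k : String) : pvOcc [] k = [] := by simp [pvOcc]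

theorem pvOcc_cons (i : Int) (ch : Char) (l : List (Int × Char)) (k : String) :
    pvOcc ((i, ch) :: l) k =
      if String.mk [ch] = k then i :: pvOcc l k else pvOcc l k := by
  unfold pvOcc
  by_cases h : String.mk [ch] = k
  · simp [h]
  · simp [h]

-- A's text loop, on a dict with duplicate-free keys, appends pvOcc to every value
theorem pvLoopA (l : List (Int × Char)) (d : PySem.Dict String (List Int))
    (hnd : d.keys.Nodup) :
    (l.foldl
      (fun d p =>
        if d.contains (String.mk [p.2]) then
          d.modify (String.mk [p.2]) [] (fun v => v ++ [p.1])
        else d) d).items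
      = d.items.map (fun q => (q.1, q.2 ++ pvOcc l q.1)) := by
  induction l generalizing d with
  | nil => simp [pvOcc_nil]
  | cons hd tl ih =>
    obtain ⟨i, ch⟩ := hd
    simp only [List.foldl_cons]
    by_cases hc : d.contains (String.mk [ch]) = true
    · rw [if_pos hc]
      rw [PySem.Dict.modify]
      rw [ih _ (PySem.Dict.nodup_keys_insert d _ _ hnd)]
      rw [PySem.Dict.items_insert, if_pos hc, List.map_map]
      apply List.map_congr_left
      intro p hp
      by_cases hk : p.1 = String.mk [ch]
      · have hget : d.get? p.1 = some p.2 := by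
          obtain ⟨p1, p2⟩ := p
          exact PySem.Dict.get?_of_mem_items d hp hnd
        have hgetD : d.getD (String.mk [ch]) [] = p.2 := by
          rw [← hk]
          simp [PySem.Dict.getD, hget]
        simp only [Function.comp, hk, beq_self_eq_true, if_pos]
        rw [hgetD, pvOcc_cons, if_pos rfl, ← hk]
        simp
      · have : (p.1 == String.mk [ch]) = false := by
          simp [hk]
        simp only [Function.comp, this, Bool.false_eq_true, if_false]
        rw [pvOcc_cons, if_neg (fun h => hk h.symm)]
    · rw [if_neg hc]
      rw [ih d hnd]
      apply List.map_congr_left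
      intro p hp
      have hne : String.mk [ch] ≠ p.1 := by
        intro h
        apply hc
        rw [PySem.Dict.contains_iff_mem_keys, h]
        unfold PySem.Dict.keys
        exact List.mem_map_of_mem hp
      rw [pvOcc_cons, if_neg hne]

-- pushing the value-map through A's seeding fold turns it into B's fold
theorem pvSeedMap (T : List (Int × Char)) (cs : List Char)
    (d : PySem.Dict String (List Int)) :
    ((cs.foldl (fun d c => d.insert (String.mk [c]) []) d).items.map
        (fun q => (q.1, q.2 ++ pvOcc T q.1)))
      = (cs.foldl (fun d c => d.insert (String.mk [c]) (pvOcc T (String.mk [c])))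
          (⟨d.items.map (fun q => (q.1, q.2 ++ pvOcc T q.1))⟩ : PySem.Dict String (List Int))).items := by
  induction cs generalizing d with
  | nil => simp [pvItems_mk]
  | cons c cs ih =>
    simp only [List.foldl_cons]
    rw [ih (d.insert (String.mk [c]) [])]
    have hcont : (⟨d.items.map (fun q => (q.1, q.2 ++ pvOcc T q.1))⟩ :
        PySem.Dict String (List Int)).contains (String.mk [c]) = d.contains (String.mk [c]) := by
      unfold PySem.Dict.contains
      rw [pvItems_mk, List.any_map]
      rfl
    have hstep : (⟨(d.insert (String.mk [c]) []).items.map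
          (fun q => (q.1, q.2 ++ pvOcc T q.1))⟩ : PySem.Dict String (List Int))
        = (⟨d.items.map (fun q => (q.1, q.2 ++ pvOcc T q.1))⟩ :
            PySem.Dict String (List Int)).insert (String.mk [c]) (pvOcc T (String.mk [c])) := by
      apply pvDictExt
      rw [pvItems_mk, PySem.Dict.items_insert, PySem.Dict.items_insert, hcont, pvItems_mk]
      by_cases hc : d.contains (String.mk [c]) = true
      · rw [if_pos hc, if_pos hc, List.map_map, List.map_map]
        apply List.map_congr_left
        intro p _
        by_cases hk : (p.1 == String.mk [c]) = true
        · simp [Function.comp, hk]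
        · simp [Function.comp, hk]
      · rw [if_neg hc, if_neg hc]
        simp
    rw [hstep]

-- ===== VERDICT (by name: the statement is the Claim_ definition above) =====
theorem get_motif_occurrences_py_spec : Claim_equal_get_motif_occurrences_py := by
  intro text motif _
  unfold Spec_get_motif_occurrences_py get_motif_occurrences_py get_motif_occurrences_py_alt
  have hnd : (motif.toList.foldl (fun d c => d.insert (String.mk [c]) [])
      (PySem.Dict.empty : PySem.Dict String (List Int))).keys.Nodup := by
    exact PySem.Dict.nodup_keys_foldl_insert_key motif.toList (fun c => String.mk [c])
      (fun _ _ => []) PySem.Dict.empty PySem.Dict.nodup_keys_empty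
  rw [pvLoopA _ _ hnd]
  rw [pvSeedMap (PySem.List.enumerate text.toList) motif.toList PySem.Dict.empty]
  have hempty : (⟨List.map (fun q => (q.1, q.2 ++ pvOcc (PySem.List.enumerate text.toList) q.1))
      PySem.Dict.empty.items⟩ : PySem.Dict String (List Int)) = PySem.Dict.empty := by
    apply pvDictExt
    simp [PySem.Dict.empty]
  rw [hempty]
  have hf : (fun (d : PySem.Dict String (List Int)) (c : Char) =>
        d.insert (String.mk [c])
          ((PySem.List.enumerate text.toList).foldl
            (fun acc p => if p.2 == c then acc ++ [p.1] else acc) []))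
      = fun (d : PySem.Dict String (List Int)) (c : Char) =>
        d.insert (String.mk [c]) (pvOcc (PySem.List.enumerate text.toList) (String.mk [c])) := by
    funext d c
    rw [pvInner_eq_occ]
  rw [hf]
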